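/- GENERATED by tools/from_farm_form.py from farm/worked/sin/Proof.lean (a worked proof of the farm's unit `sin`,
   accepted by the verdict) — do not edit. -/
import Asan.CheckWalk
import ProgX.Base.Spec.Units.sin

open X86 X86.User Asan ProgX.Base

set_option maxRecDepth 4000
set_option maxHeartbeats 4000000

namespace ProgX.Base.Spec.Proved.sin
open ProgX.Base.Spec.sin (Statement)

/-- The shadow clause of `sincos_quadrant`'s precondition at the state `s` entered by `sin`'s `call` (0x102dc5): the `call`
pushed one return address (`s.rsp = u.rsp - 8`) and wrote no shadow byte, so the layer of `sin`'s own entry state `u`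
(clean stack below `u.rsp + 8`) holds again with the clean stack ending 8 bytes lower, at `s.rsp + 8 = u.rsp`, which is still
a stack address (`hlo`: the contract's stack room). -/
theorem shadowPre_callee_w {others : List Obj} {frames : List (Nat × FrameLayout)} {u s : State}
    (hsh : ShadowPre others frames u) (hun : ShadowUntouched u.mem s.mem)
    (hrsp : (s.reg .rsp).toNat + 8 = (u.reg .rsp).toNat) (hlo : 0x700000 ≤ (u.reg .rsp).toNat) : ShadowPre others frames s := by
  have hsp := hsh.rsp
  refine ⟨?_, hsh.offText⟩
  rw [hrsp]
  exact (hsh.inv.untouched hun).lower (by omega) (by omega) hlo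

end ProgX.Base.Spec.Proved.sin

/-- `sin(x)` satisfies its contract: `mov edi, 0 ; call sincos_quadrant ; ret` — one call of a function with a contract (the
walker's general call rule), whose 24-byte frame below the pushed return address is `sin`'s whole footprint. -/
theorem ProgX.Base.Spec.Proved.sin_ok : ProgX.Base.Spec.sin.Statement := by
  intro Lay hLay μ hμ u₀ hcode h_sincos_quadrant others frames u ret he hpre
  v_entry he
  have hsh : ShadowPre others frames u := hpre
  have hsp := hsh.rsp
  -- the callee's contract, for the same live objects (the walker sees only an instantiated `Calls`)
  have hq := h_sincos_quadrant others frames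
  -- 0x102dc0 `mov edi, 0` ; 0x102dc5 `call sincos_quadrant` (libm.c:233)
  u_walk hcode [hμ.vendor] span [ProgX.Base.L.textLo, ProgX.Base.L.textHi] side (v_side)
  · -- call_inv: DF and the MXCSR masks at the callee's entry are those of our entry (`mov` and `call` write neither)
    show X86.User.abiInv _
    refine ProgX.Base.abiInv_of ?_ ?_
    · rw [w_flags]
      exact he_df
    · rw [w_mxcsr]
      exact he_mx
  · -- the callee's precondition: the shadow layer, with the clean stack ending at our rsp (the pushed return address below it)
    show ShadowPre others frames s_102dc5
    have hun : ShadowUntouched u.mem s_102dc5.mem := by v_untouched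
    have hrsp : (s_102dc5.reg .rsp).toNat + 8 = (u.reg .rsp).toNat := by
      rw [w_rsp]
      u_omega
    exact ProgX.Base.Spec.Proved.sin.shadowPre_callee_w hsh hun hrsp (by omega)
  -- 0x102dca, after the return of `sincos_quadrant`: what its contract says, in terms of OUR entry state
  have w_eq := ProgX.Base.conv_code_eqOn w_code
  simp only [X86.User.Spec.footprint, vspec, w_rsp_102dc5] at w_same
  rw [w_mem_102dc5] at w_same
  -- our return address at [rsp] is above the callee's window [rsp - 32, rsp - 8)
  have hs0 : UInt64.ofNat (s_102dc5r.mem.readLE (u.reg .rsp) 8) = ret := by u_frame he_retAddr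
  have hdf : s_102dc5r.flags .df = false := (show abiInv _ from w_inv).1
  have hmx : s_102dc5r.mxcsr &&& 0x1F80 = 0x1F80 := (show abiInv _ from w_inv).2
  -- 0x102dca `ret` (libm.c:234)
  u_walk hcode [hμ.vendor] span [ProgX.Base.L.textLo, ProgX.Base.L.textHi] side (v_side)
  -- the state after the `ret`: the contract's `Returned` (DF and the masks restated for it, so that `v_returned` finds them at once)
  have hdf' : s_102dca.flags .df = false := by
    rw [w_flags]
    exact hdf
  have hmx' : s_102dca.mxcsr &&& 0x1F80 = 0x1F80 := by
    rw [w_mxcsr]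
    exact hmx
  refine ReachVia.done ?_
  v_returned
  -- the post: no shadow byte written (ours: one push; the callee's: its own frame, `w_same`)
  show ShadowUntouched u.mem s_102dca.mem
  v_untouched
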